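-- pv_equiv track=rewrite | github.com/AdRestreph/CEFIT | Diseño Algoritmos/Diseño de Algoritmos 2/Taller 2/Ejercicio5.py | generar_numeros_y_sumatoria
-- ===== SOURCE A (Python) =====
-- def generar_numeros_y_sumatoria(rango_final:int)->tuple:
--     # Se crean tres listas vacias para almacenar los numeros, los pares y los impares
--     numeros = []
--     numeros_pares = []
--     numeros_impares = []
--     # Se inicializa la variable sumatoria en 0
--     sumatoria = 0
--     # Se utiliza un ciclo for para recorrer los numeros del 1 al rango_final
--     for numero in range(1, rango_final + 1):
--         # Se agrega el numero a la lista de numeros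
--         numeros.append(numero)
--         # Se suma el numero a la sumatoria acumulada
--         sumatoria += numero
--         # Se crea una condicion para verificar si el numero es par o impar
--         if numero % 2 == 0:
--             # Si es par se agrega a la lista de numeros pares
--             numeros_pares.append(numero)
--         else:
--             # Si es impar se agrega a la lista de numeros impares
--             numeros_impares.append(numero)
--     # Se retorna las tres listas y la sumatoria como una tupla
--     return numeros, numeros_pares, numeros_impares, sumatoria
-- ===== SOURCE B (Python) =====
-- def generar_numeros_y_sumatoria(rango_final: int) -> tuple:
--     # Stepped ranges instead of a per-element parity branch inside one loop.
--     numeros = list(range(1, rango_final + 1))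
--     numeros_pares = list(range(2, rango_final + 1, 2))
--     numeros_impares = list(range(1, rango_final + 1, 2))
--     sumatoria = sum(numeros)
--     return numeros, numeros_pares, numeros_impares, sumatoria
-- ===== Notes on version B (the rewrite author's own statement) =====
-- stated objective: idiomatic
-- what changed: Replaces the single loop with appends and a modulo branch by direct stepped range constructions (step 2 for evens/odds) and sum() over the range.
import Mathlib
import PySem

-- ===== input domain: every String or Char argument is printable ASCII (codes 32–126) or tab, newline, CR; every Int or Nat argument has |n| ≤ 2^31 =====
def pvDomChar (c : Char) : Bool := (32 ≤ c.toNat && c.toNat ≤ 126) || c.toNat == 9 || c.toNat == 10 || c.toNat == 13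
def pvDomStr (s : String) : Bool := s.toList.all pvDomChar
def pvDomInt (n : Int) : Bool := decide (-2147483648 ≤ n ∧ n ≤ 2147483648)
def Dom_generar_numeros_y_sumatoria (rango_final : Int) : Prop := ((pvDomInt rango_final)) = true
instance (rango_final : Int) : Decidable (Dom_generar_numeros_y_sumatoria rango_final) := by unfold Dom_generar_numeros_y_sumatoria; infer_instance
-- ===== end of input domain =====

-- B replaces A's single loop (appends + modulo branch) by direct stepped ranges and a range sum; objective: idiomatic.

-- ===== PORT A =====
def generar_numeros_y_sumatoria (rango_final : Int) : List Int × List Int × List Int × Int :=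
  (PySem.List.pyRange 1 (rango_final + 1) 1).foldl
    (fun (st : List Int × List Int × List Int × Int) numero =>
      let numeros := st.1 ++ [numero]
      let sumatoria := st.2.2.2 + numero
      if PySem.Int.mod numero 2 = 0 then
        (numeros, st.2.1 ++ [numero], st.2.2.1, sumatoria)
      else
        (numeros, st.2.1, st.2.2.1 ++ [numero], sumatoria))
    ([], [], [], 0)

-- ===== PORT B =====
def generar_numeros_y_sumatoria_alt (rango_final : Int) : List Int × List Int × List Int × Int :=
  let numeros := PySem.List.pyRange 1 (rango_final + 1) 1
  let numeros_pares := PySem.List.pyRange 2 (rango_final + 1) 2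
  let numeros_impares := PySem.List.pyRange 1 (rango_final + 1) 2
  (numeros, numeros_pares, numeros_impares, numeros.sum)

-- ===== PRECONDITION & SPEC =====
def Spec_generar_numeros_y_sumatoria (rango_final : Int) (out : List Int × List Int × List Int × Int) : Prop := out = generar_numeros_y_sumatoria_alt rango_final
instance (rango_final : Int) (out : List Int × List Int × List Int × Int) : Decidable (Spec_generar_numeros_y_sumatoria rango_final out) := by unfold Spec_generar_numeros_y_sumatoria; infer_instance

-- ===== CLAIM (what is proved, stated in full; the proofs are below) =====
def Claim_equal_generar_numeros_y_sumatoria : Prop := ∀ (rango_final : Int), Dom_generar_numeros_y_sumatoria rango_final → Spec_generar_numeros_y_sumatoria rango_final (generar_numeros_y_sumatoria rango_final)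

-- ===== LEMMAS AND PROOFS =====

-- step lemmas for the stepped ranges
theorem pvStepEven (n : Int) (hn : 0 ≤ n) (he : (n + 1) % 2 = 0) :
    PySem.List.pyRange 2 (n + 2) 2 = PySem.List.pyRange 2 (n + 1) 2 ++ [n + 1] := by
  rw [PySem.List.pyRange_of_pos _ _ (by norm_num), PySem.List.pyRange_of_pos _ _ (by norm_num)]
  have hc : (if (2:Int) < n + 2 then ((n + 2 - 2 + 2 - 1) / 2).toNat else 0)
      = (if (2:Int) < n + 1 then ((n + 1 - 2 + 2 - 1) / 2).toNat else 0) + 1 := by split_ifs <;> omega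
  rw [hc, List.range_succ, List.map_append]
  congr 1
  simp only [List.map_cons, List.map_nil, List.cons.injEq, and_true]
  split_ifs with h
  · push_cast; omega
  · push_cast; omega

theorem pvStepEvenSkip (n : Int) (hn : 0 ≤ n) (ho : (n + 1) % 2 = 1) :
    PySem.List.pyRange 2 (n + 2) 2 = PySem.List.pyRange 2 (n + 1) 2 := by
  rw [PySem.List.pyRange_of_pos _ _ (by norm_num), PySem.List.pyRange_of_pos _ _ (by norm_num)]
  have hc : (if (2:Int) < n + 2 then ((n + 2 - 2 + 2 - 1) / 2).toNat else 0)
      = (if (2:Int) < n + 1 then ((n + 1 - 2 + 2 - 1) / 2).toNat else 0) := by split_ifs <;> omega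
  rw [hc]

theorem pvStepOdd (n : Int) (hn : 0 ≤ n) (ho : (n + 1) % 2 = 1) :
    PySem.List.pyRange 1 (n + 2) 2 = PySem.List.pyRange 1 (n + 1) 2 ++ [n + 1] := by
  rw [PySem.List.pyRange_of_pos _ _ (by norm_num), PySem.List.pyRange_of_pos _ _ (by norm_num)]
  have hc : (if (1:Int) < n + 2 then ((n + 2 - 1 + 2 - 1) / 2).toNat else 0)
      = (if (1:Int) < n + 1 then ((n + 1 - 1 + 2 - 1) / 2).toNat else 0) + 1 := by split_ifs <;> omega
  rw [hc, List.range_succ, List.map_append]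
  congr 1
  simp only [List.map_cons, List.map_nil, List.cons.injEq, and_true]
  split_ifs with h
  · push_cast; omega
  · push_cast; omega

theorem pvStepOddSkip (n : Int) (hn : 0 ≤ n) (he : (n + 1) % 2 = 0) :
    PySem.List.pyRange 1 (n + 2) 2 = PySem.List.pyRange 1 (n + 1) 2 := by
  rw [PySem.List.pyRange_of_pos _ _ (by norm_num), PySem.List.pyRange_of_pos _ _ (by norm_num)]
  have hc : (if (1:Int) < n + 2 then ((n + 2 - 1 + 2 - 1) / 2).toNat else 0)
      = (if (1:Int) < n + 1 then ((n + 1 - 1 + 2 - 1) / 2).toNat else 0) := by split_ifs <;> omega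
  rw [hc]

theorem pvMain (k : Nat) :
    generar_numeros_y_sumatoria (k : Int) = generar_numeros_y_sumatoria_alt (k : Int) := by
  induction k with
  | zero =>
      simp [generar_numeros_y_sumatoria, generar_numeros_y_sumatoria_alt,
        PySem.List.pyRange_one_eq_nil, PySem.List.pyRange]
  | succ k ih =>
      have hk : (0:Int) ≤ (k : Int) := by positivity
      have hsplit : PySem.List.pyRange 1 ((k : Int) + 1 + 1) 1
          = PySem.List.pyRange 1 ((k : Int) + 1) 1 ++ [(k : Int) + 1] :=
        PySem.List.pyRange_one_succ_right (by omega)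
      unfold generar_numeros_y_sumatoria at ih ⊢
      unfold generar_numeros_y_sumatoria_alt at ih ⊢
      push_cast
      rw [hsplit, List.foldl_append, ih]
      have e2 : ((k : Int) + 1 + 1) = ((k : Int) + 2) := by ring
      rw [e2]
      simp only [List.foldl_cons, List.foldl_nil]
      have hmod : PySem.Int.mod ((k : Int) + 1) 2 = ((k : Int) + 1) % 2 := by
        rw [PySem.Int.mod, Int.fmod_eq_emod]
        simp
      rcases Int.emod_two_eq_zero_or_one ((k : Int) + 1) with he | ho
      · rw [hmod]
        simp only [he, if_pos]
        rw [pvStepEven _ hk he, pvStepOddSkip _ hk he]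
        simp [List.sum_append]
      · rw [hmod]
        simp only [ho]
        rw [if_neg (by omega), pvStepEvenSkip _ hk ho, pvStepOdd _ hk ho]
        simp [List.sum_append]

-- ===== VERDICT (by name: the statement is the Claim_ definition above) =====
theorem generar_numeros_y_sumatoria_spec : Claim_equal_generar_numeros_y_sumatoria := by
  intro n _
  unfold Spec_generar_numeros_y_sumatoria
  by_cases hle : n ≤ 0
  · have h1 : PySem.List.pyRange 1 (n + 1) 1 = [] :=
      PySem.List.pyRange_one_eq_nil (by omega)
    have h2 : PySem.List.pyRange 2 (n + 1) 2 = [] := by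
      rw [PySem.List.pyRange_of_pos _ _ (by norm_num : (0:Int) < 2), if_neg (by omega)]
      simp
    have h3 : PySem.List.pyRange 1 (n + 1) 2 = [] := by
      rw [PySem.List.pyRange_of_pos _ _ (by norm_num : (0:Int) < 2), if_neg (by omega)]
      simp
    simp [generar_numeros_y_sumatoria, generar_numeros_y_sumatoria_alt, h1, h2, h3]
  · have : n = (n.toNat : Int) := by omega
    rw [this]
    exact pvMain n.toNat
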